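-- pv_equiv track=rewrite | github.com/MostHumble/PatientTrajectoryForecasting | utils/loadData.py | resetIntegerOutput
-- ===== SOURCE A (Python) =====
-- from collections import defaultdict
-- from typing import Dict, Optional, Tuple, List, Union
--
-- def resetIntegerOutput(source_target_sequences: List[List[int]]) -> Tuple[List[List[int]], Dict[int, int]]:
--     """
--     Resets the integer output codes in the given sequence of pairs.
--
--     Args:
--         source_target_sequences (List[List[int]]): A list of pairs where each pair contains an integer and a list of codes.
--
--     Returns:
--         Tuple[List[List[int]], Dict[int, int]]: A tuple containing the updated pairs and a dictionary mapping the old codes to new codes.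
--     """
--     updated_source_target_sequences = []
--     # keep same ids for special tokens
--     old_to_new_map = defaultdict(lambda: len(old_to_new_map), {0: 0, 1: 1, 2: 2, 3: 3, 4: 4, 5: 5})
--
--     for pair in source_target_sequences:
--         list_of_visits = []
--         for target_visit in pair[1]:
--             updated_target_visit = []
--             for code in target_visit:
--                 updated_target_visit.append(old_to_new_map[code])
--             list_of_visits.append(updated_target_visit)
--         updated_source_target_sequences.append((pair[0], list_of_visits))
--
--     return updated_source_target_sequences, dict(old_to_new_map)
-- ===== SOURCE B (Python) =====
-- def resetIntegerOutput(source_target_sequences):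
--     # Flatten the code stream, dedupe the non-special codes in first-occurrence
--     # order, then number everything at once with enumerate.
--     flat = [code for pair in source_target_sequences for visit in pair[1] for code in visit]
--     fresh = list(dict.fromkeys(code for code in flat if not (0 <= code <= 5)))
--     old_to_new_map = {code: new for new, code in enumerate(list(range(6)) + fresh)}
--     updated_source_target_sequences = [
--         (pair[0], [[old_to_new_map[code] for code in visit] for visit in pair[1]])
--         for pair in source_target_sequences]
--     return updated_source_target_sequences, old_to_new_map
-- ===== Notes on version B (the rewrite author's own statement) =====
-- stated objective: alternative
-- what changed: B replaces A's incrementally grown len-based defaultdict with a closed-form numbering: it flattens the code stream, stably dedupes the non-special codes (dict.fromkeys), numbers range(6)+fresh by a single enumerate into a dict comprehension, and rebuilds the output by pure lookups.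
import Mathlib
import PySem

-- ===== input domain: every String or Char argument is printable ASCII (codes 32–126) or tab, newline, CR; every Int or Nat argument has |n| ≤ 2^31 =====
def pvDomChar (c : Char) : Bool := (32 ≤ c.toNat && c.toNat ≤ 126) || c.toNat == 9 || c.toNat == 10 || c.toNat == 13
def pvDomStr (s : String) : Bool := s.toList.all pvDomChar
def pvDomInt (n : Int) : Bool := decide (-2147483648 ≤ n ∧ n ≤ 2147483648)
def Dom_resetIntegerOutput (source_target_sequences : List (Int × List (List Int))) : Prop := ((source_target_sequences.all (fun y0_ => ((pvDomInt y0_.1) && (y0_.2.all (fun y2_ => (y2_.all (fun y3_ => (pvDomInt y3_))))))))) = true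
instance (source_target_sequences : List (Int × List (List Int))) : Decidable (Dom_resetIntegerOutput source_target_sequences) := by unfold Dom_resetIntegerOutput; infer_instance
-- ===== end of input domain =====

-- B numbers the codes in closed form (flatten, stable-dedupe the non-special codes,
-- enumerate range(6)+fresh into a dict) instead of A's incrementally grown len-based
-- defaultdict interleaved with output construction (objective: alternative, same cost).


-- ===== PORT A =====
-- the special-token seed {0:0, ..., 5:5}
def pvSeed : PySem.Dict Int Int :=
  PySem.Dict.ofList [(0, 0), (1, 1), (2, 2), (3, 3), (4, 4), (5, 5)]

-- one code: `updated_target_visit.append(old_to_new_map[code])` on the defaultdict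
-- (missing key inserts len(old_to_new_map) taken BEFORE the insertion)
def pvACode (st : List Int × PySem.Dict Int Int) (code : Int) :
    List Int × PySem.Dict Int Int :=
  match st.2.get? code with
  | some v => (st.1 ++ [v], st.2)
  | none => (st.1 ++ [(st.2.size : Int)], st.2.insert code (st.2.size : Int))

-- one target_visit
def pvAVisit (st : List (List Int) × PySem.Dict Int Int) (target_visit : List Int) :
    List (List Int) × PySem.Dict Int Int :=
  let r := target_visit.foldl pvACode ([], st.2)
  (st.1 ++ [r.1], r.2)

-- one pair
def pvAPair (st : List (Int × List (List Int)) × PySem.Dict Int Int)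
    (pair : Int × List (List Int)) :
    List (Int × List (List Int)) × PySem.Dict Int Int :=
  let r := pair.2.foldl pvAVisit ([], st.2)
  (st.1 ++ [(pair.1, r.1)], r.2)

def resetIntegerOutput (source_target_sequences : List (Int × List (List Int))) :
    (List (Int × List (List Int))) × (List (Int × Int)) :=
  let r := source_target_sequences.foldl pvAPair ([], pvSeed)
  (r.1, r.2.items)

-- ===== PORT B =====
-- flat = [code for pair in sts for visit in pair[1] for code in visit]
def pvFlatCodes (source_target_sequences : List (Int × List (List Int))) : List Int :=
  source_target_sequences.flatMap (fun pair => pair.2.flatMap (fun visit => visit))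

-- fresh = list(dict.fromkeys(code for code in flat if not (0 <= code <= 5)))
def pvFreshCodes (source_target_sequences : List (Int × List (List Int))) : List Int :=
  PySem.List.dedup
    ((pvFlatCodes source_target_sequences).filter (fun code => !(decide (0 ≤ code ∧ code ≤ 5))))

-- old_to_new_map = {code: new for new, code in enumerate(list(range(6)) + fresh)}
def pvBMap (source_target_sequences : List (Int × List (List Int))) : PySem.Dict Int Int :=
  (PySem.List.enumerate (PySem.List.pyRange 0 6 1 ++ pvFreshCodes source_target_sequences) 0).foldl
    (fun d p => d.insert p.2 p.1) PySem.Dict.empty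

def resetIntegerOutput_alt (source_target_sequences : List (Int × List (List Int))) :
    (List (Int × List (List Int))) × (List (Int × Int)) :=
  let m := pvBMap source_target_sequences
  (source_target_sequences.map (fun pair =>
      (pair.1, pair.2.map (fun visit => visit.map (fun code => m.getD code 0)))),
   m.items)

-- ===== PRECONDITION & SPEC =====
def Spec_resetIntegerOutput (source_target_sequences : List (Int × List (List Int))) (out : (List (Int × List (List Int))) × (List (Int × Int))) : Prop := out = resetIntegerOutput_alt source_target_sequences
instance (source_target_sequences : List (Int × List (List Int))) (out : (List (Int × List (List Int))) × (List (Int × Int))) : Decidable (Spec_resetIntegerOutput source_target_sequences out) := by unfold Spec_resetIntegerOutput; infer_instance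

-- ===== CLAIM (what is proved, stated in full; the proofs are below) =====
def Claim_equal_resetIntegerOutput : Prop := ∀ (source_target_sequences : List (Int × List (List Int))), Dom_resetIntegerOutput source_target_sequences → Spec_resetIntegerOutput source_target_sequences (resetIntegerOutput source_target_sequences)

-- ===== LEMMAS AND PROOFS =====

-- proof-side model of A's map growth: one code of the defaultdict, map only
def pvBCode (m : PySem.Dict Int Int) (code : Int) : PySem.Dict Int Int :=
  if m.contains code then m else m.insert code (m.size : Int)

-- `m` extends to `M`: every binding of `m` survives in `M`
def pvExt (m M : PySem.Dict Int Int) : Prop :=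
  ∀ k v, m.get? k = some v → M.get? k = some v

theorem pvExt_refl (m : PySem.Dict Int Int) : pvExt m m := fun _ _ h => h

theorem pvExt_trans {a b c : PySem.Dict Int Int} (h1 : pvExt a b) (h2 : pvExt b c) :
    pvExt a c := fun k v h => h2 k v (h1 k v h)

theorem pvExt_bCode (m : PySem.Dict Int Int) (c : Int) : pvExt m (pvBCode m c) := by
  intro k v h
  unfold pvBCode
  split_ifs with hc
  · exact h
  · have hk : k ≠ c := by
      intro he; subst he
      rw [(PySem.Dict.get?_eq_none_iff_contains m k).mpr (by simpa using hc)] at h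
      simp at h
    rw [PySem.Dict.get?_insert_of_ne _ _ hk]; exact h

theorem pvExt_bCodes (visit : List Int) :
    ∀ m, pvExt m (visit.foldl pvBCode m) := by
  induction visit with
  | nil => intro m; exact pvExt_refl m
  | cons c cs ih =>
      intro m
      exact pvExt_trans (pvExt_bCode m c) (ih (pvBCode m c))

theorem pvExt_bVisits (visits : List (List Int)) :
    ∀ m, pvExt m (visits.foldl (fun m visit => visit.foldl pvBCode m) m) := by
  induction visits with
  | nil => intro m; exact pvExt_refl m
  | cons v vs ih =>
      intro m
      exact pvExt_trans (pvExt_bCodes v m) (ih _)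

theorem pvExt_bPairs (pairs : List (Int × List (List Int))) :
    ∀ m, pvExt m (pairs.foldl
      (fun m pair => pair.2.foldl (fun m visit => visit.foldl pvBCode m) m) m) := by
  induction pairs with
  | nil => intro m; exact pvExt_refl m
  | cons p ps ih =>
      intro m
      exact pvExt_trans (pvExt_bVisits p.2 m) (ih _)

-- inner loop: A's per-visit code loop returns exactly the lookups in any extension M
theorem pvCodes_loop (visit : List Int) :
    ∀ (acc : List Int) (m M : PySem.Dict Int Int),
      pvExt (visit.foldl pvBCode m) M →
      visit.foldl pvACode (acc, m)
        = (acc ++ visit.map (fun c => M.getD c 0), visit.foldl pvBCode m) := by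
  induction visit with
  | nil => intro acc m M _; simp
  | cons c cs ih =>
      intro acc m M hM
      rw [List.foldl_cons] at hM
      simp only [List.foldl_cons, List.map_cons]
      cases h : m.get? c with
      | some v =>
          have hstep : pvBCode m c = m := by
            unfold pvBCode
            have hc : m.contains c = true := by
              cases hcon : m.contains c with
              | true => rfl
              | false =>
                  rw [(PySem.Dict.get?_eq_none_iff_contains m c).mpr hcon] at h
                  simp at h
            simp [hc]
          rw [hstep] at hM ⊢
          have hMv : M.getD c 0 = v :=
            PySem.Dict.getD_of_get?_eq_some _ _ (hM c v (pvExt_bCodes cs m c v h))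
          have hA : pvACode (acc, m) c = (acc ++ [v], m) := by
            unfold pvACode; simp [h]
          rw [hA, ih (acc ++ [v]) m M hM, hMv]
          simp
      | none =>
          have hcon : m.contains c = false :=
            (PySem.Dict.get?_eq_none_iff_contains m c).mp h
          have hstep : pvBCode m c = m.insert c (m.size : Int) := by
            unfold pvBCode; simp [hcon]
          rw [hstep] at hM ⊢
          have hMv : M.getD c 0 = (m.size : Int) := by
            apply PySem.Dict.getD_of_get?_eq_some
            exact hM c _ (pvExt_bCodes cs _ c _ (PySem.Dict.get?_insert_self m c _))
          have hA : pvACode (acc, m) c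
              = (acc ++ [(m.size : Int)], m.insert c (m.size : Int)) := by
            unfold pvACode; simp [h]
          rw [hA, ih (acc ++ [(m.size : Int)]) _ M hM, hMv]
          simp

-- middle loop
theorem pvVisits_loop (visits : List (List Int)) :
    ∀ (acc : List (List Int)) (m M : PySem.Dict Int Int),
      pvExt (visits.foldl (fun m visit => visit.foldl pvBCode m) m) M →
      visits.foldl pvAVisit (acc, m)
        = (acc ++ visits.map (fun visit => visit.map (fun c => M.getD c 0)),
           visits.foldl (fun m visit => visit.foldl pvBCode m) m) := by
  induction visits with
  | nil => intro acc m M _; simp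
  | cons v vs ih =>
      intro acc m M hM
      simp only [List.foldl_cons, List.map_cons]
      have hv : pvAVisit (acc, m) v
          = (acc ++ [v.map (fun c => M.getD c 0)], v.foldl pvBCode m) := by
        unfold pvAVisit
        rw [pvCodes_loop v [] m M (pvExt_trans (pvExt_bVisits vs _) hM)]
        simp
      rw [hv, ih _ _ M hM]
      simp

-- outer loop
theorem pvPairs_loop (pairs : List (Int × List (List Int))) :
    ∀ (acc : List (Int × List (List Int))) (m M : PySem.Dict Int Int),
      pvExt (pairs.foldl
        (fun m pair => pair.2.foldl (fun m visit => visit.foldl pvBCode m) m) m) M →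
      pairs.foldl pvAPair (acc, m)
        = (acc ++ pairs.map (fun pair =>
             (pair.1, pair.2.map (fun visit => visit.map (fun c => M.getD c 0)))),
           pairs.foldl
             (fun m pair => pair.2.foldl (fun m visit => visit.foldl pvBCode m) m) m) := by
  induction pairs with
  | nil => intro acc m M _; simp
  | cons p ps ih =>
      intro acc m M hM
      simp only [List.foldl_cons, List.map_cons]
      have hp : pvAPair (acc, m) p
          = (acc ++ [(p.1, p.2.map (fun visit => visit.map (fun c => M.getD c 0)))],
             p.2.foldl (fun m visit => visit.foldl pvBCode m) m) := by
        unfold pvAPair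
        rw [pvVisits_loop p.2 [] m M (pvExt_trans (pvExt_bPairs ps _) hM)]
        simp
      rw [hp, ih _ _ M hM]
      simp

-- the nested map-growth fold is the fold over the flattened code stream
theorem pvBuildMap_eq_flat (pairs : List (Int × List (List Int))) :
    ∀ m, pairs.foldl
        (fun m pair => pair.2.foldl (fun m visit => visit.foldl pvBCode m) m) m
      = (pairs.flatMap (fun pair => pair.2.flatMap (fun visit => visit))).foldl pvBCode m := by
  induction pairs with
  | nil => intro m; simp
  | cons p ps ih =>
      intro m
      simp only [List.foldl_cons, List.flatMap_cons, List.foldl_append]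
      rw [ih]
      congr 1
      clear ih
      induction p.2 generalizing m with
      | nil => simp
      | cons v vs ihv => simp only [List.foldl_cons, List.flatMap_cons, List.foldl_append, ihv]

-- first-encounter list of codes not yet seen
def pvFreshL (seen : List Int) : List Int → List Int
  | [] => []
  | c :: cs => if c ∈ seen then pvFreshL seen cs else c :: pvFreshL (c :: seen) cs

theorem pvFreshL_congr (l : List Int) :
    ∀ (s t : List Int), (∀ x, x ∈ s ↔ x ∈ t) → pvFreshL s l = pvFreshL t l := by
  induction l with
  | nil => intro s t _; rfl
  | cons c cs ih =>
      intro s t h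
      unfold pvFreshL
      by_cases hc : c ∈ s
      · rw [if_pos hc, if_pos ((h c).mp hc), ih s t h]
      · rw [if_neg hc, if_neg (fun ht => hc ((h c).mpr ht))]
        have : ∀ x, x ∈ c :: s ↔ x ∈ c :: t := by
          intro x; simp [h x]
        rw [ih (c :: s) (c :: t) this]

-- pvFreshL as a Set.add fold (connects to dict.fromkeys of the filtered stream)
theorem pvFreshL_foldl (p : Int → Bool) (l : List Int) :
    ∀ (seen acc : List Int), (∀ x, x ∈ seen ↔ (p x = false ∨ x ∈ acc)) →
      acc ++ pvFreshL seen l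
        = l.foldl (fun s c => if p c then PySem.Set.add s c else s) acc := by
  induction l with
  | nil => intro seen acc _; simp [pvFreshL]
  | cons c cs ih =>
      intro seen acc h
      rw [List.foldl_cons]
      cases hpc : p c with
      | false =>
          have hcs : c ∈ seen := (h c).mpr (Or.inl hpc)
          simp only [Bool.false_eq_true, if_false]
          have hl : pvFreshL seen (c :: cs) = pvFreshL seen cs := by
            simp only [pvFreshL, if_pos hcs]
          rw [hl]
          exact ih seen acc h
      | true =>
          simp only [if_true]
          by_cases hca : c ∈ acc
          · have hcs : c ∈ seen := (h c).mpr (Or.inr hca)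
            have hl : pvFreshL seen (c :: cs) = pvFreshL seen cs := by
              simp only [pvFreshL, if_pos hcs]
            rw [hl, PySem.Set.add_of_mem hca]
            exact ih seen acc h
          · have hcs : c ∉ seen := by
              intro hs
              rcases (h c).mp hs with h1 | h2
              · rw [hpc] at h1; exact absurd h1 (by simp)
              · exact hca h2
            have hl : pvFreshL seen (c :: cs) = c :: pvFreshL (c :: seen) cs := by
              simp only [pvFreshL, if_neg hcs]
            rw [hl, PySem.Set.add_of_not_mem hca]
            have hnew : ∀ x, x ∈ c :: seen ↔ (p x = false ∨ x ∈ acc ++ [c]) := by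
              intro x
              simp only [List.mem_cons, List.mem_append, h x]
              constructor
              · rintro (rfl | h1 | h2)
                · exact Or.inr (Or.inr (by simp))
                · exact Or.inl h1
                · exact Or.inr (Or.inl h2)
              · rintro (h1 | h2 | h3)
                · exact Or.inr (Or.inl h1)
                · exact Or.inr (Or.inr h2)
                · simp at h3; exact Or.inl h3
            have := ih (c :: seen) (acc ++ [c]) hnew
            rw [← this]
            simp

-- B's fresh list is pvFreshL over the seed's keys
theorem pvFreshCodes_eq (sts : List (Int × List (List Int))) :
    pvFreshCodes sts
      = pvFreshL pvSeed.keys (pvFlatCodes sts) := by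
  unfold pvFreshCodes
  have hd : PySem.List.dedup
      ((pvFlatCodes sts).filter (fun code => !(decide (0 ≤ code ∧ code ≤ 5))))
      = ((pvFlatCodes sts).filter (fun code => !(decide (0 ≤ code ∧ code ≤ 5)))).foldl
          PySem.Set.add [] := by
    rw [PySem.List.dedup_eq_ofList, PySem.Set.ofList_eq_foldl]
  rw [hd, ← PySem.List.foldl_if_eq_foldl_filter]
  rw [← pvFreshL_foldl (fun code => !(decide (0 ≤ code ∧ code ≤ 5))) (pvFlatCodes sts)
        [0, 1, 2, 3, 4, 5] []
        (by intro x; simp; omega)]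
  rw [List.nil_append]
  apply pvFreshL_congr
  intro x
  have : pvSeed.keys = [0, 1, 2, 3, 4, 5] := by decide
  rw [this]

-- the map-growth fold performs exactly the fresh insertions, in order
theorem pvFold_bCode_eq (l : List Int) :
    ∀ (m : PySem.Dict Int Int),
      l.foldl pvBCode m
        = (pvFreshL m.keys l).foldl (fun d c => d.insert c (d.size : Int)) m := by
  induction l with
  | nil => intro m; rfl
  | cons c cs ih =>
      intro m
      simp only [List.foldl_cons]
      unfold pvFreshL
      by_cases hc : c ∈ m.keys
      · have hcon : m.contains c = true := (PySem.Dict.contains_iff_mem_keys m c).mpr hc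
        rw [if_pos hc]
        have : pvBCode m c = m := by unfold pvBCode; simp [hcon]
        rw [this, ih m]
      · have hcon : m.contains c = false := by
          cases h : m.contains c with
          | true => exact absurd ((PySem.Dict.contains_iff_mem_keys m c).mp h) hc
          | false => rfl
        rw [if_neg hc]
        have hstep : pvBCode m c = m.insert c (m.size : Int) := by
          unfold pvBCode; simp [hcon]
        rw [hstep, ih (m.insert c (m.size : Int)), List.foldl_cons]
        congr 1
        apply pvFreshL_congr
        intro x
        rw [PySem.Dict.mem_keys_insert]
        simp [List.mem_cons]

-- items of the fresh-insert fold: appends the enumerated fresh codes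
theorem pvIns_items (fs : List Int) :
    ∀ (m : PySem.Dict Int Int), fs.Nodup → (∀ c ∈ fs, m.contains c = false) →
      (fs.foldl (fun d c => d.insert c (d.size : Int)) m).items
        = m.items ++ (PySem.List.enumerate fs (m.size : Int)).map (fun p => (p.2, p.1)) := by
  induction fs with
  | nil => intro m _ _; simp [PySem.List.enumerate_nil]
  | cons c cs ih =>
      intro m hnd hfresh
      simp only [List.foldl_cons]
      have hcon : m.contains c = false := hfresh c (by simp)
      have hsz : (m.insert c (m.size : Int)).size = m.size + 1 := by
        rw [PySem.Dict.size_insert]; simp [hcon]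
      have hfresh' : ∀ c' ∈ cs, (m.insert c (m.size : Int)).contains c' = false := by
        intro c' hc'
        rw [PySem.Dict.contains_insert]
        have hne : c' ≠ c := by
          intro he; subst he; exact (List.nodup_cons.mp hnd).1 hc'
        simp [hne, hfresh c' (by simp [hc'])]
      rw [ih _ (List.nodup_cons.mp hnd).2 hfresh']
      rw [PySem.Dict.items_insert_of_not_contains m _ hcon, hsz]
      rw [PySem.List.enumerate_cons]
      simp [List.append_assoc]

-- items of B's enumerate fold: the enumerated pairs, swapped
theorem pvBMap_items (sts : List (Int × List (List Int))) :
    (pvBMap sts).items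
      = (PySem.List.enumerate (PySem.List.pyRange 0 6 1 ++ pvFreshCodes sts) 0).map
          (fun p => (p.2, p.1)) := by
  unfold pvBMap
  have hcodes : (PySem.List.pyRange 0 6 1 ++ pvFreshCodes sts).Nodup := by
    rw [List.nodup_append]
    refine ⟨PySem.List.nodup_pyRange_one 0 6, ?_, ?_⟩
    · unfold pvFreshCodes
      rw [PySem.List.dedup_eq_ofList]
      exact PySem.Set.nodup_ofList _
    · intro x hx y hy
      rw [PySem.List.mem_pyRange_one] at hx
      intro he; subst he
      unfold pvFreshCodes at hy
      rw [PySem.List.dedup_eq_ofList, PySem.Set.mem_ofList, List.mem_filter] at hy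
      have := hy.2
      simp at this
      omega
  have hk : ((PySem.List.enumerate (PySem.List.pyRange 0 6 1 ++ pvFreshCodes sts) 0).map
      (fun p => p.2)).Nodup := by
    rw [PySem.List.map_snd_enumerate]; exact hcodes
  have := PySem.Dict.items_foldl_insert_fresh
    (PySem.List.enumerate (PySem.List.pyRange 0 6 1 ++ pvFreshCodes sts) 0)
    (fun p => p.2) (fun p => p.1) PySem.Dict.empty (by intro a _; simp) hk
  simpa using this

-- A's final map equals B's map
theorem pvBuildMap_eq_pvBMap (sts : List (Int × List (List Int))) :
    sts.foldl (fun m pair => pair.2.foldl (fun m visit => visit.foldl pvBCode m) m) pvSeed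
      = pvBMap sts := by
  apply PySem.Dict.ext
  have hfreshNd : (pvFreshCodes sts).Nodup := by
    unfold pvFreshCodes
    rw [PySem.List.dedup_eq_ofList]
    exact PySem.Set.nodup_ofList _
  have hfreshOut : ∀ c ∈ pvFreshCodes sts, pvSeed.contains c = false := by
    intro c hc
    unfold pvFreshCodes at hc
    rw [PySem.List.dedup_eq_ofList, PySem.Set.mem_ofList, List.mem_filter] at hc
    have hrange : c < 0 ∨ 5 < c := by
      have := hc.2; simp at this; omega
    have hseed : pvSeed = PySem.Dict.mk [(0,0),(1,1),(2,2),(3,3),(4,4),(5,5)] := by decide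
    rw [hseed, PySem.Dict.contains_mk]
    simp
    omega
  have hA : (sts.foldl
        (fun m pair => pair.2.foldl (fun m visit => visit.foldl pvBCode m) m) pvSeed).items
      = pvSeed.items
        ++ (PySem.List.enumerate (pvFreshCodes sts) (pvSeed.size : Int)).map
             (fun p => (p.2, p.1)) := by
    rw [pvBuildMap_eq_flat sts pvSeed, ← pvFlatCodes, pvFold_bCode_eq, ← pvFreshCodes_eq]
    exact pvIns_items _ _ hfreshNd hfreshOut
  rw [hA, pvBMap_items]
  rw [PySem.List.enumerate_append]
  rw [List.map_append]
  have h1 : (PySem.List.enumerate (PySem.List.pyRange 0 6 1) 0).map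
      (fun p : Int × Int => (p.2, p.1)) = pvSeed.items := by decide
  have h2 : (0 : Int) + ((PySem.List.pyRange 0 6 1).length : Int) = (pvSeed.size : Int) := by
    decide
  rw [h1, h2]

-- ===== VERDICT (by name: the statement is the Claim_ definition above) =====
theorem resetIntegerOutput_spec : Claim_equal_resetIntegerOutput := by
  intro sts _
  unfold Spec_resetIntegerOutput resetIntegerOutput resetIntegerOutput_alt
  have hM := pvBuildMap_eq_pvBMap sts
  rw [pvPairs_loop sts [] pvSeed (pvBMap sts) (by rw [hM]; exact pvExt_refl _)]
  rw [hM]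
  simp
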